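-- pv_equiv track=rewrite | github.com/stanislawf-commits/etsy | src/agents/design_agent.py | _detect_shape
-- ===== SOURCE A (Python) =====
-- def _detect_shape(topic: str) -> str:
--     """Dobiera kształt bazując na słowach kluczowych tematu."""
--     t = topic.lower()
--     if any(w in t for w in ("mountain", "climbing", "peak", "alpine", "hill")):
--         return "mountain"
--     if any(w in t for w in ("heart", "love", "valentine")):
--         return "heart"
--     if any(w in t for w in ("star", "celestial", "astro")):
--         return "star"
--     if any(w in t for w in ("moon", "crescent", "lunar")):
--         return "moon"
--     if any(w in t for w in ("flower", "floral", "wreath", "botanical", "petal", "rose", "daisy")):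
--         return "floral"
--     if any(w in t for w in ("leaf", "leaves", "foliage")):
--         return "leaf"
--     if any(w in t for w in ("butterfly", "moth")):
--         return "butterfly"
--     if any(w in t for w in ("mushroom", "cottagecore", "toadstool")):
--         return "mushroom"
--     if any(w in t for w in ("hex", "hexagon", "geometric", "honeycomb")):
--         return "hexagon"
--     if any(w in t for w in ("sun", "boho", "sunburst", "sunshine")):
--         return "sun"
--     if any(w in t for w in ("pumpkin", "halloween", "gourd")):
--         return "pumpkin"
--     if any(w in t for w in ("christmas", "xmas", "tree", "pine", "fir")):
--         return "christmas_tree"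
--     if any(w in t for w in ("snowflake", "snow", "winter", "ice crystal")):
--         return "snowflake"
--     if any(w in t for w in ("gingerbread", "ginger", "man", "person", "human")):
--         return "gingerbread"
--     # S2.5 new shapes
--     if any(w in t for w in ("cat", "kitten", "kitty")):
--         return "cat"
--     if any(w in t for w in ("dog", "puppy", "dachshund", "poodle")):
--         return "dog"
--     if any(w in t for w in ("rabbit", "bunny", "hare", "easter bunny")):
--         return "rabbit"
--     if any(w in t for w in ("hen", "chicken", "chick", "rooster")):
--         return "hen"
--     if any(w in t for w in ("bear", "teddy")):
--         return "bear"
--     if any(w in t for w in ("owl",)):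
--         return "owl"
--     if any(w in t for w in ("llama", "alpaca")):
--         return "llama"
--     if any(w in t for w in ("fish", "goldfish")):
--         return "fish"
--     if any(w in t for w in ("bird", "robin", "sparrow")):
--         return "bird"
--     if any(w in t for w in ("apple",)):
--         return "apple"
--     if any(w in t for w in ("cactus", "succulent")):
--         return "cactus"
--     if any(w in t for w in ("strawberry",)):
--         return "strawberry"
--     if any(w in t for w in ("tulip",)):
--         return "tulip"
--     if any(w in t for w in ("easter", "egg")):
--         return "easter_egg"
--     if any(w in t for w in ("crown", "princess", "queen", "royal")):
--         return "crown"
--     if any(w in t for w in ("cookie", "biscuit", "shortbread")):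
--         return "cookie"
--     return "rounded_rect"
-- ===== SOURCE B (Python) =====
-- # Flat keyword index: each keyword maps to (priority, shape); the result is the
-- # shape of the minimum-priority keyword found in the lowercased topic.
-- KEYWORDS = {
--     "mountain": (0, "mountain"),
--     "climbing": (0, "mountain"),
--     "peak": (0, "mountain"),
--     "alpine": (0, "mountain"),
--     "hill": (0, "mountain"),
--     "heart": (1, "heart"),
--     "love": (1, "heart"),
--     "valentine": (1, "heart"),
--     "star": (2, "star"),
--     "celestial": (2, "star"),
--     "astro": (2, "star"),
--     "moon": (3, "moon"),
--     "crescent": (3, "moon"),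
--     "lunar": (3, "moon"),
--     "flower": (4, "floral"),
--     "floral": (4, "floral"),
--     "wreath": (4, "floral"),
--     "botanical": (4, "floral"),
--     "petal": (4, "floral"),
--     "rose": (4, "floral"),
--     "daisy": (4, "floral"),
--     "leaf": (5, "leaf"),
--     "leaves": (5, "leaf"),
--     "foliage": (5, "leaf"),
--     "butterfly": (6, "butterfly"),
--     "moth": (6, "butterfly"),
--     "mushroom": (7, "mushroom"),
--     "cottagecore": (7, "mushroom"),
--     "toadstool": (7, "mushroom"),
--     "hex": (8, "hexagon"),
--     "hexagon": (8, "hexagon"),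
--     "geometric": (8, "hexagon"),
--     "honeycomb": (8, "hexagon"),
--     "sun": (9, "sun"),
--     "boho": (9, "sun"),
--     "sunburst": (9, "sun"),
--     "sunshine": (9, "sun"),
--     "pumpkin": (10, "pumpkin"),
--     "halloween": (10, "pumpkin"),
--     "gourd": (10, "pumpkin"),
--     "christmas": (11, "christmas_tree"),
--     "xmas": (11, "christmas_tree"),
--     "tree": (11, "christmas_tree"),
--     "pine": (11, "christmas_tree"),
--     "fir": (11, "christmas_tree"),
--     "snowflake": (12, "snowflake"),
--     "snow": (12, "snowflake"),
--     "winter": (12, "snowflake"),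
--     "ice crystal": (12, "snowflake"),
--     "gingerbread": (13, "gingerbread"),
--     "ginger": (13, "gingerbread"),
--     "man": (13, "gingerbread"),
--     "person": (13, "gingerbread"),
--     "human": (13, "gingerbread"),
--     "cat": (14, "cat"),
--     "kitten": (14, "cat"),
--     "kitty": (14, "cat"),
--     "dog": (15, "dog"),
--     "puppy": (15, "dog"),
--     "dachshund": (15, "dog"),
--     "poodle": (15, "dog"),
--     "rabbit": (16, "rabbit"),
--     "bunny": (16, "rabbit"),
--     "hare": (16, "rabbit"),
--     "easter bunny": (16, "rabbit"),
--     "hen": (17, "hen"),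
--     "chicken": (17, "hen"),
--     "chick": (17, "hen"),
--     "rooster": (17, "hen"),
--     "bear": (18, "bear"),
--     "teddy": (18, "bear"),
--     "owl": (19, "owl"),
--     "llama": (20, "llama"),
--     "alpaca": (20, "llama"),
--     "fish": (21, "fish"),
--     "goldfish": (21, "fish"),
--     "bird": (22, "bird"),
--     "robin": (22, "bird"),
--     "sparrow": (22, "bird"),
--     "apple": (23, "apple"),
--     "cactus": (24, "cactus"),
--     "succulent": (24, "cactus"),
--     "strawberry": (25, "strawberry"),
--     "tulip": (26, "tulip"),
--     "easter": (27, "easter_egg"),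
--     "egg": (27, "easter_egg"),
--     "crown": (28, "crown"),
--     "princess": (28, "crown"),
--     "queen": (28, "crown"),
--     "royal": (28, "crown"),
--     "cookie": (29, "cookie"),
--     "biscuit": (29, "cookie"),
--     "shortbread": (29, "cookie"),
-- }
--
--
-- def _detect_shape(topic: str) -> str:
--     t = topic.lower()
--     hits = [ps for kw, ps in KEYWORDS.items() if kw in t]
--     return min(hits, key=lambda ps: ps[0], default=(0, "rounded_rect"))[1]
-- ===== Notes on version B (the rewrite author's own statement) =====
-- stated objective: alternative
-- what changed: The 30-branch first-match priority cascade is replaced by a flat keyword->(priority, shape) dictionary: B collects every keyword that occurs in the lowercased topic and returns the shape of the minimum-priority hit (argmin over all matches instead of an ordered early-return scan).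
import Mathlib
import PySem

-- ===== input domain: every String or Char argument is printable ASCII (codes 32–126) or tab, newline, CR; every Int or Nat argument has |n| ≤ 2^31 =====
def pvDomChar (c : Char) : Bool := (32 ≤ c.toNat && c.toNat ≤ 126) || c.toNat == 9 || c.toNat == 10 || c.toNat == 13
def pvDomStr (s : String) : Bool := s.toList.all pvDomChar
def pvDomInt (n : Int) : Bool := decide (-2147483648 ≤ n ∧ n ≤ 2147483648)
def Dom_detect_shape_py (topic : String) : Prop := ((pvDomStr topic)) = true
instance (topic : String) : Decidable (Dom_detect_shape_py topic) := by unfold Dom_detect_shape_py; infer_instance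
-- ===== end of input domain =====

-- B replaces A's 30-branch priority cascade by a flat keyword→(priority, shape) index:
-- it collects ALL matching keywords and returns the shape of the minimum-priority hit (objective: alternative).

-- ===== PORT A =====
-- any(w in t for w in (...)) for one tuple of keywords
def pvAnyIn (ws : List String) (t : String) : Bool := ws.any (fun w => PySem.Str.isIn w t)

def detect_shape_py (topic : String) : String :=
  let t := PySem.Str.lower topic
  if pvAnyIn ["mountain", "climbing", "peak", "alpine", "hill"] t then "mountain"
  else if pvAnyIn ["heart", "love", "valentine"] t then "heart"
  else if pvAnyIn ["star", "celestial", "astro"] t then "star"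
  else if pvAnyIn ["moon", "crescent", "lunar"] t then "moon"
  else if pvAnyIn ["flower", "floral", "wreath", "botanical", "petal", "rose", "daisy"] t then "floral"
  else if pvAnyIn ["leaf", "leaves", "foliage"] t then "leaf"
  else if pvAnyIn ["butterfly", "moth"] t then "butterfly"
  else if pvAnyIn ["mushroom", "cottagecore", "toadstool"] t then "mushroom"
  else if pvAnyIn ["hex", "hexagon", "geometric", "honeycomb"] t then "hexagon"
  else if pvAnyIn ["sun", "boho", "sunburst", "sunshine"] t then "sun"
  else if pvAnyIn ["pumpkin", "halloween", "gourd"] t then "pumpkin"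
  else if pvAnyIn ["christmas", "xmas", "tree", "pine", "fir"] t then "christmas_tree"
  else if pvAnyIn ["snowflake", "snow", "winter", "ice crystal"] t then "snowflake"
  else if pvAnyIn ["gingerbread", "ginger", "man", "person", "human"] t then "gingerbread"
  else if pvAnyIn ["cat", "kitten", "kitty"] t then "cat"
  else if pvAnyIn ["dog", "puppy", "dachshund", "poodle"] t then "dog"
  else if pvAnyIn ["rabbit", "bunny", "hare", "easter bunny"] t then "rabbit"
  else if pvAnyIn ["hen", "chicken", "chick", "rooster"] t then "hen"
  else if pvAnyIn ["bear", "teddy"] t then "bear"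
  else if pvAnyIn ["owl"] t then "owl"
  else if pvAnyIn ["llama", "alpaca"] t then "llama"
  else if pvAnyIn ["fish", "goldfish"] t then "fish"
  else if pvAnyIn ["bird", "robin", "sparrow"] t then "bird"
  else if pvAnyIn ["apple"] t then "apple"
  else if pvAnyIn ["cactus", "succulent"] t then "cactus"
  else if pvAnyIn ["strawberry"] t then "strawberry"
  else if pvAnyIn ["tulip"] t then "tulip"
  else if pvAnyIn ["easter", "egg"] t then "easter_egg"
  else if pvAnyIn ["crown", "princess", "queen", "royal"] t then "crown"
  else if pvAnyIn ["cookie", "biscuit", "shortbread"] t then "cookie"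
  else "rounded_rect"

-- ===== PORT B =====
-- Source B's KEYWORDS dict: keyword -> (priority, shape), insertion order
def pvKeywords : List (String × (Nat × String)) :=
  [
    ("mountain", (0, "mountain")),
    ("climbing", (0, "mountain")),
    ("peak", (0, "mountain")),
    ("alpine", (0, "mountain")),
    ("hill", (0, "mountain")),
    ("heart", (1, "heart")),
    ("love", (1, "heart")),
    ("valentine", (1, "heart")),
    ("star", (2, "star")),
    ("celestial", (2, "star")),
    ("astro", (2, "star")),
    ("moon", (3, "moon")),
    ("crescent", (3, "moon")),
    ("lunar", (3, "moon")),
    ("flower", (4, "floral")),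
    ("floral", (4, "floral")),
    ("wreath", (4, "floral")),
    ("botanical", (4, "floral")),
    ("petal", (4, "floral")),
    ("rose", (4, "floral")),
    ("daisy", (4, "floral")),
    ("leaf", (5, "leaf")),
    ("leaves", (5, "leaf")),
    ("foliage", (5, "leaf")),
    ("butterfly", (6, "butterfly")),
    ("moth", (6, "butterfly")),
    ("mushroom", (7, "mushroom")),
    ("cottagecore", (7, "mushroom")),
    ("toadstool", (7, "mushroom")),
    ("hex", (8, "hexagon")),
    ("hexagon", (8, "hexagon")),
    ("geometric", (8, "hexagon")),
    ("honeycomb", (8, "hexagon")),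
    ("sun", (9, "sun")),
    ("boho", (9, "sun")),
    ("sunburst", (9, "sun")),
    ("sunshine", (9, "sun")),
    ("pumpkin", (10, "pumpkin")),
    ("halloween", (10, "pumpkin")),
    ("gourd", (10, "pumpkin")),
    ("christmas", (11, "christmas_tree")),
    ("xmas", (11, "christmas_tree")),
    ("tree", (11, "christmas_tree")),
    ("pine", (11, "christmas_tree")),
    ("fir", (11, "christmas_tree")),
    ("snowflake", (12, "snowflake")),
    ("snow", (12, "snowflake")),
    ("winter", (12, "snowflake")),
    ("ice crystal", (12, "snowflake")),
    ("gingerbread", (13, "gingerbread")),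
    ("ginger", (13, "gingerbread")),
    ("man", (13, "gingerbread")),
    ("person", (13, "gingerbread")),
    ("human", (13, "gingerbread")),
    ("cat", (14, "cat")),
    ("kitten", (14, "cat")),
    ("kitty", (14, "cat")),
    ("dog", (15, "dog")),
    ("puppy", (15, "dog")),
    ("dachshund", (15, "dog")),
    ("poodle", (15, "dog")),
    ("rabbit", (16, "rabbit")),
    ("bunny", (16, "rabbit")),
    ("hare", (16, "rabbit")),
    ("easter bunny", (16, "rabbit")),
    ("hen", (17, "hen")),
    ("chicken", (17, "hen")),
    ("chick", (17, "hen")),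
    ("rooster", (17, "hen")),
    ("bear", (18, "bear")),
    ("teddy", (18, "bear")),
    ("owl", (19, "owl")),
    ("llama", (20, "llama")),
    ("alpaca", (20, "llama")),
    ("fish", (21, "fish")),
    ("goldfish", (21, "fish")),
    ("bird", (22, "bird")),
    ("robin", (22, "bird")),
    ("sparrow", (22, "bird")),
    ("apple", (23, "apple")),
    ("cactus", (24, "cactus")),
    ("succulent", (24, "cactus")),
    ("strawberry", (25, "strawberry")),
    ("tulip", (26, "tulip")),
    ("easter", (27, "easter_egg")),
    ("egg", (27, "easter_egg")),
    ("crown", (28, "crown")),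
    ("princess", (28, "crown")),
    ("queen", (28, "crown")),
    ("royal", (28, "crown")),
    ("cookie", (29, "cookie")),
    ("biscuit", (29, "cookie")),
    ("shortbread", (29, "cookie"))
  ]

-- hits = [ps for kw, ps in KEYWORDS.items() if kw in t]; min(hits, key=prio, default=(0,"rounded_rect"))[1]
def detect_shape_py_alt (topic : String) : String :=
  let t := PySem.Str.lower topic
  let hits := (pvKeywords.filter (fun e => PySem.Str.isIn e.1 t)).map Prod.snd
  (PySem.List.minD hits (fun ps => ps.1) (0, "rounded_rect")).2

-- ===== PRECONDITION & SPEC =====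
def Spec_detect_shape_py (topic : String) (out : String) : Prop := out = detect_shape_py_alt topic
instance (topic : String) (out : String) : Decidable (Spec_detect_shape_py topic out) := by unfold Spec_detect_shape_py; infer_instance

-- ===== CLAIM (what is proved, stated in full; the proofs are below) =====
def Claim_equal_detect_shape_py : Prop := ∀ (topic : String), Dom_detect_shape_py topic → Spec_detect_shape_py topic (detect_shape_py topic)

-- ===== LEMMAS AND PROOFS =====

-- proof-side characterisation of A: the rule table with priorities, scanned first-match
def pvRulesP : List (Nat × List String × String) :=
  [
    (0, ["mountain", "climbing", "peak", "alpine", "hill"], "mountain"),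
    (1, ["heart", "love", "valentine"], "heart"),
    (2, ["star", "celestial", "astro"], "star"),
    (3, ["moon", "crescent", "lunar"], "moon"),
    (4, ["flower", "floral", "wreath", "botanical", "petal", "rose", "daisy"], "floral"),
    (5, ["leaf", "leaves", "foliage"], "leaf"),
    (6, ["butterfly", "moth"], "butterfly"),
    (7, ["mushroom", "cottagecore", "toadstool"], "mushroom"),
    (8, ["hex", "hexagon", "geometric", "honeycomb"], "hexagon"),
    (9, ["sun", "boho", "sunburst", "sunshine"], "sun"),
    (10, ["pumpkin", "halloween", "gourd"], "pumpkin"),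
    (11, ["christmas", "xmas", "tree", "pine", "fir"], "christmas_tree"),
    (12, ["snowflake", "snow", "winter", "ice crystal"], "snowflake"),
    (13, ["gingerbread", "ginger", "man", "person", "human"], "gingerbread"),
    (14, ["cat", "kitten", "kitty"], "cat"),
    (15, ["dog", "puppy", "dachshund", "poodle"], "dog"),
    (16, ["rabbit", "bunny", "hare", "easter bunny"], "rabbit"),
    (17, ["hen", "chicken", "chick", "rooster"], "hen"),
    (18, ["bear", "teddy"], "bear"),
    (19, ["owl"], "owl"),
    (20, ["llama", "alpaca"], "llama"),
    (21, ["fish", "goldfish"], "fish"),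
    (22, ["bird", "robin", "sparrow"], "bird"),
    (23, ["apple"], "apple"),
    (24, ["cactus", "succulent"], "cactus"),
    (25, ["strawberry"], "strawberry"),
    (26, ["tulip"], "tulip"),
    (27, ["easter", "egg"], "easter_egg"),
    (28, ["crown", "princess", "queen", "royal"], "crown"),
    (29, ["cookie", "biscuit", "shortbread"], "cookie")
  ]

def pvFirstMatch (rs : List (Nat × List String × String)) (t : String) (dflt : String) : String :=
  match rs with
  | [] => dflt
  | r :: rest => if r.2.1.any (fun w => PySem.Str.isIn w t) then r.2.2 else pvFirstMatch rest t dflt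

def pvFlatten (rs : List (Nat × List String × String)) : List (String × (Nat × String)) :=
  rs.flatMap (fun r => r.2.1.map (fun k => (k, (r.1, r.2.2))))

lemma pvKeywords_eq_flatten : pvKeywords = pvFlatten pvRulesP := by rfl

lemma pvA_eq_firstMatch (topic : String) :
    detect_shape_py topic = pvFirstMatch pvRulesP (PySem.Str.lower topic) "rounded_rect" := by
  unfold detect_shape_py pvAnyIn pvRulesP
  simp only [pvFirstMatch]

lemma pvMin?_all_head (xs ys : List (Nat × String)) (i : Nat) (s : String)
    (hne : xs ≠ []) (hall : ∀ x ∈ xs, x = (i, s)) (hys : ∀ y ∈ ys, i < y.1) :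
    PySem.List.min? (xs ++ ys) (fun ps => ps.1) = some (i, s) := by
  obtain ⟨x0, xs', rfl⟩ := List.exists_cons_of_ne_nil hne
  cases h : PySem.List.min? ((x0 :: xs') ++ ys) (fun ps => ps.1) with
  | none =>
      have := (PySem.List.min?_eq_none_iff (xs := (x0 :: xs') ++ ys) (key := fun ps => ps.1)).mp h
      simp at this
  | some m =>
      have hmem := PySem.List.min?_mem h
      have hmin := PySem.List.min?_isMin h
      have hx0 : x0 = (i, s) := hall x0 (by simp)
      have hle : m.1 ≤ i := by
        have := hmin x0 (by simp)
        rw [hx0] at this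
        exact this
      rcases List.mem_append.mp hmem with hx | hy
      · rw [hall m hx]
      · exact absurd hle (by have := hys m hy; omega)

lemma pvIdx_of_mem_flatten {e : String × (Nat × String)} {rs : List (Nat × List String × String)}
    (h : e ∈ pvFlatten rs) : ∃ r ∈ rs, e.2.1 = r.1 := by
  unfold pvFlatten at h
  rw [List.mem_flatMap] at h
  obtain ⟨r, hr, he⟩ := h
  rw [List.mem_map] at he
  obtain ⟨k, _, rfl⟩ := he
  exact ⟨r, hr, rfl⟩

-- core: first-match over the rule table = shape of the minimum-priority hit in the flat index
lemma pvCore (t : String) :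
    ∀ (rs : List (Nat × List String × String)) (dflt : Nat × String),
      rs.Pairwise (fun a b => a.1 < b.1) →
      (PySem.List.minD (((pvFlatten rs).filter (fun e => PySem.Str.isIn e.1 t)).map Prod.snd)
        (fun ps => ps.1) dflt).2 = pvFirstMatch rs t dflt.2 := by
  intro rs
  induction rs with
  | nil => intro dflt _; rfl
  | cons r rest ih =>
      intro dflt hpw
      obtain ⟨i, kws, s⟩ := r
      rw [List.pairwise_cons] at hpw
      obtain ⟨h1, h2⟩ := hpw
      have hflat : pvFlatten ((i, kws, s) :: rest)
          = kws.map (fun k => (k, (i, s))) ++ pvFlatten rest := by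
        simp [pvFlatten]
      rw [hflat, List.filter_append, List.map_append]
      by_cases hb : kws.any (fun w => PySem.Str.isIn w t) = true
      · -- rule r fires: the combined hit list has minimum (i, s)
        have hne : (kws.filter (fun w => PySem.Str.isIn w t)) ≠ [] := by
          rw [List.any_eq_true] at hb
          obtain ⟨w, hw, hwt⟩ := hb
          intro hnil
          have hmem : w ∈ kws.filter (fun w => PySem.Str.isIn w t) :=
            List.mem_filter.mpr ⟨hw, hwt⟩
          rw [hnil] at hmem
          simp at hmem
        have hfm : ((kws.map (fun k => (k, (i, s)))).filter
              (fun e => PySem.Str.isIn e.1 t)).map Prod.snd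
            = (kws.filter (fun w => PySem.Str.isIn w t)).map (fun _ => (i, s)) := by
          rw [List.filter_map, List.map_map]
          rfl
        rw [hfm]
        unfold pvFirstMatch
        rw [if_pos hb]
        unfold PySem.List.minD
        rw [pvMin?_all_head _ _ i s
              (by intro hnil; exact hne (by simpa using hnil))
              (by intro x hx; rw [List.mem_map] at hx; obtain ⟨_, _, rfl⟩ := hx; rfl)
              (by intro y hy
                  rw [List.mem_map] at hy
                  obtain ⟨e, he, rfl⟩ := hy
                  obtain ⟨r', hr', heq⟩ := pvIdx_of_mem_flatten (List.mem_of_mem_filter he)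
                  rw [heq]
                  exact h1 r' hr')]
        rfl
      · -- rule r does not fire: its keywords contribute nothing
        have hb' : ∀ w ∈ kws, PySem.Str.isIn w t = false := by
          simpa [List.any_eq_false] using hb
        have hnil : kws.filter (fun w => PySem.Str.isIn w t) = [] := by
          rw [List.filter_eq_nil_iff]
          intro w hw
          simp only [Bool.not_eq_true]
          exact hb' w hw
        have hfm : ((kws.map (fun k => (k, (i, s)))).filter
              (fun e => PySem.Str.isIn e.1 t)).map Prod.snd
            = (kws.filter (fun w => PySem.Str.isIn w t)).map (fun _ => ((i : Nat), s)) := by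
          rw [List.filter_map, List.map_map]
          rfl
        rw [hfm, hnil]
        unfold pvFirstMatch
        rw [if_neg hb, List.map_nil, List.nil_append]
        exact ih dflt h2

lemma pvRulesP_pairwise : pvRulesP.Pairwise (fun a b => a.1 < b.1) := by
  unfold pvRulesP
  simp

-- ===== VERDICT (by name: the statement is the Claim_ definition above) =====
theorem detect_shape_py_spec : Claim_equal_detect_shape_py := by
  intro topic _
  unfold Spec_detect_shape_py
  rw [pvA_eq_firstMatch]
  unfold detect_shape_py_alt
  rw [pvKeywords_eq_flatten]
  exact (pvCore (PySem.Str.lower topic) pvRulesP (0, "rounded_rect") pvRulesP_pairwise).symm
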